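-- pv_equiv track=rewrite | github.com/Satyaki-Roy/python | Practice/prac36.py | printStar
-- ===== SOURCE A (Python) =====
-- def printStar(s, pi=0, ci=0):
--     if ci == len(s) - 1:
--         if s[pi] == s[ci]:
--             return '*' + s[ci]
--         else:
--             return s[ci]
--     if pi == ci:
--         return s[ci] + printStar(s, pi, ci + 1)
--     elif s[pi] == s[ci]:
--         return '*' + s[ci] + printStar(s, pi + 1, ci + 1)
--     elif s[pi] != s[ci]:
--         return s[ci] + printStar(s, pi + 1, ci + 1)
-- ===== SOURCE B (Python) =====
-- def printStar(s, pi=0, ci=0):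
--     n = len(s)
--     parts = []
--     if pi == ci and ci != n - 1:
--         parts.append(s[ci])
--         pi, ci = ci, ci + 1
--     d = ci - pi
--     parts.extend('*' + s[j] if s[j - d] == s[j] else s[j] for j in range(ci, n))
--     return ''.join(parts)
-- ===== Notes on version B (the rewrite author's own statement) =====
-- stated objective: simpler
-- what changed: Replaces the two-pointer recursion by one normalization step plus a single comprehension over range(ci, n) that compares s[j] with s[j-d] at a fixed offset d = ci - pi, joined at the end.
import Mathlib
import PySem

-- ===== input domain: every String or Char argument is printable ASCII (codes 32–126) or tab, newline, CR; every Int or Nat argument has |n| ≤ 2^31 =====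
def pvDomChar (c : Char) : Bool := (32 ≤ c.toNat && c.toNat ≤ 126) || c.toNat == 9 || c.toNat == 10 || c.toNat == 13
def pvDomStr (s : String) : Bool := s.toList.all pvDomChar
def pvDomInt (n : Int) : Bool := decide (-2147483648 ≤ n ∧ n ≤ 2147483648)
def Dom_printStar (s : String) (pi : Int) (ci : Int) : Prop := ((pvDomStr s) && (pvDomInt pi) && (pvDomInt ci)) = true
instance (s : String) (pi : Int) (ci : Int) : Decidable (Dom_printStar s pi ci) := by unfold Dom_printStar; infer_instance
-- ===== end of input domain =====

-- B replaces A's two-pointer recursion by one normalization step plus a single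
-- fixed-offset comprehension over range(ci, n), joined at the end (objective: simpler).

-- ===== PORT A =====
-- Strings are handled as their character lists; where Python raises IndexError
-- (pyGet? = none) the port returns [] — such inputs are excluded by Pre_printStar.
def printStarGoA (cs : List Char) (pi ci : Int) : List Char :=
  if ci = (cs.length : Int) - 1 then
    match PySem.List.pyGet? cs pi, PySem.List.pyGet? cs ci with
    | some a, some c => if a = c then ['*', c] else [c]
    | _, _ => []
  else if pi = ci then
    match _hc : PySem.List.pyGet? cs ci with
    | some c => c :: printStarGoA cs pi (ci + 1)
    | none => []
  else
    match PySem.List.pyGet? cs pi, _hc : PySem.List.pyGet? cs ci with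
    | some a, some c =>
        if a = c then '*' :: c :: printStarGoA cs (pi + 1) (ci + 1)
        else c :: printStarGoA cs (pi + 1) (ci + 1)
    | _, _ => []
termination_by ((cs.length : Int) - 1 - ci).toNat
decreasing_by
  all_goals
    have h2 : PySem.Raise.InRange cs.length ci := by
      by_contra hq
      exact absurd ((PySem.List.pyGet?_eq_none_iff (xs := cs) (i := ci)).mpr hq) (by simp [_hc])
  all_goals simp only [PySem.Raise.InRange] at h2
  all_goals omega

def printStar (s : String) (pi : Int) (ci : Int) : String :=
  String.mk (printStarGoA s.toList pi ci)

-- ===== PORT B =====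
-- the comprehension ['*'+s[j] if s[j-d]==s[j] else s[j] for j in range(a, n)], flattened
def pyStarParts (cs : List Char) (d a : Int) : List Char :=
  ((PySem.List.pyRange a (cs.length : Int) 1).map (fun j =>
    match PySem.List.pyGet? cs (j - d), PySem.List.pyGet? cs j with
    | some x, some c => if x = c then ['*', c] else [c]
    | _, _ => [])).flatten

def printStar_alt (s : String) (pi : Int) (ci : Int) : String :=
  let cs := s.toList
  let n : Int := cs.length
  if pi = ci ∧ ci ≠ n - 1 then
    -- normalization step: emit s[ci], continue from ci+1 with offset d = 1
    let head : List Char := match PySem.List.pyGet? cs ci with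
      | some c => [c]
      | none => []
    String.mk (head ++ pyStarParts cs 1 (ci + 1))
  else
    String.mk (pyStarParts cs (ci - pi) ci)

-- ===== PRECONDITION & SPEC =====
-- Pre_ excludes exactly the inputs on which the Python A raises IndexError
-- (empty string; ci past the end; any pi/ci index the recursion reaches out of range).
def Pre_printStar (s : String) (pi : Int) (ci : Int) : Prop :=
  s ≠ "" ∧
    ((ci = (s.toList.length : Int) - 1 ∧ -(s.toList.length : Int) ≤ pi ∧ pi ≤ (s.toList.length : Int) - 1) ∨
     (ci < (s.toList.length : Int) - 1 ∧ -(s.toList.length : Int) ≤ pi ∧ pi ≤ ci))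
instance (s : String) (pi : Int) (ci : Int) : Decidable (Pre_printStar s pi ci) := by
  unfold Pre_printStar; infer_instance

def pvWitness_printStar : String × Int × Int := ("aab", 0, 0)

def Spec_printStar (s : String) (pi : Int) (ci : Int) (out : String) : Prop := out = printStar_alt s pi ci
instance (s : String) (pi : Int) (ci : Int) (out : String) : Decidable (Spec_printStar s pi ci out) := by unfold Spec_printStar; infer_instance

-- ===== CLAIM (what is proved, stated in full; the proofs are below) =====
def Claim_equal_printStar : Prop := ∀ (s : String) (pi : Int) (ci : Int), Dom_printStar s pi ci → Pre_printStar s pi ci → Spec_printStar s pi ci (printStar s pi ci)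

-- ===== LEMMAS AND PROOFS =====

lemma pyGet?_some_of_inrange (cs : List Char) (i : Int)
    (h1 : -(cs.length : Int) ≤ i) (h2 : i < (cs.length : Int)) :
    ∃ c, PySem.List.pyGet? cs i = some c := by
  have h := (PySem.List.pyGet?_eq_none_iff (xs := cs) (i := i))
  cases hg : PySem.List.pyGet? cs i with
  | some c => exact ⟨c, rfl⟩
  | none =>
      exfalso
      have := h.mp hg
      simp only [PySem.Raise.InRange] at this
      omega

lemma goA_eq_parts (cs : List Char) (d : Int) :
    ∀ (ci : Int), (1 ≤ d ∨ ci = (cs.length : Int) - 1) →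
    -(cs.length : Int) ≤ ci - d → ci - d ≤ (cs.length : Int) - 1 →
    -(cs.length : Int) ≤ ci → ci ≤ (cs.length : Int) - 1 →
    printStarGoA cs (ci - d) ci = pyStarParts cs d ci := by
  intro ci
  induction hm : ((cs.length : Int) - 1 - ci).toNat generalizing ci with
  | zero =>
      intro _ hp1 hp2 hc1 hc2
      have hce : ci = (cs.length : Int) - 1 := by omega
      subst hce
      obtain ⟨a, ha⟩ := pyGet?_some_of_inrange cs ((cs.length : Int) - 1 - d) (by omega) (by omega)
      obtain ⟨c, hc⟩ := pyGet?_some_of_inrange cs ((cs.length : Int) - 1) (by omega) (by omega)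
      rw [printStarGoA]
      have hrange : PySem.List.pyRange ((cs.length : Int) - 1) (cs.length : Int) 1
          = [(cs.length : Int) - 1] := by
        have := PySem.List.pyRange_one_singleton (a := (cs.length : Int) - 1)
        simpa using this
      simp [pyStarParts, hrange, ha, hc]
  | succ m ih =>
      intro hd hp1 hp2 hc1 hc2
      have hlt : ci < (cs.length : Int) - 1 := by omega
      have hd1 : 1 ≤ d := by
        rcases hd with h | h
        · exact h
        · omega
      obtain ⟨a, ha⟩ := pyGet?_some_of_inrange cs (ci - d) (by omega) (by omega)
      obtain ⟨c, hc⟩ := pyGet?_some_of_inrange cs ci (by omega) (by omega)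
      rw [printStarGoA]
      have hne : ¬ ci = (cs.length : Int) - 1 := by omega
      have hne2 : ¬ ci - d = ci := by omega
      rw [if_neg hne, if_neg hne2]
      have hstep : ci - d + 1 = (ci + 1) - d := by omega
      have hrec : printStarGoA cs (ci - d + 1) (ci + 1) = pyStarParts cs d (ci + 1) := by
        rw [hstep]
        exact ih (ci + 1) (by omega) (by omega) (by omega) (by omega) (by omega) (by omega)
      have hcons : PySem.List.pyRange ci (cs.length : Int) 1
          = ci :: PySem.List.pyRange (ci + 1) (cs.length : Int) 1 :=
        PySem.List.pyRange_one_cons (by omega)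
      simp only [pyStarParts, hcons, List.map_cons, List.flatten_cons] at *
      rw [ha, hc, hrec]
      by_cases hac : a = c
      · simp [hac]
      · simp [hac]

-- ===== VERDICT (by name: the statement is the Claim_ definition above) =====
theorem printStar_spec : Claim_equal_printStar := by
  intro s pi ci _hdom hpre
  unfold Spec_printStar printStar printStar_alt
  obtain ⟨hne, hpre⟩ := hpre
  have hn1 : 1 ≤ (s.toList.length : Int) := by
    rcases hpre with ⟨_, h1, h2⟩ | ⟨h0, h1, h2⟩ <;> omega
  by_cases hb : pi = ci ∧ ci ≠ (s.toList.length : Int) - 1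
  · obtain ⟨hpc, hci⟩ := hb
    subst hpc
    have hlt : pi < (s.toList.length : Int) - 1 := by
      rcases hpre with ⟨h0, _, _⟩ | ⟨h0, _, _⟩ <;> omega
    have hge : -(s.toList.length : Int) ≤ pi := by
      rcases hpre with ⟨_, h1, _⟩ | ⟨_, h1, _⟩ <;> omega
    rw [if_pos ⟨rfl, hci⟩]
    obtain ⟨c, hc⟩ := pyGet?_some_of_inrange s.toList pi hge (by omega)
    rw [printStarGoA, if_neg hci, if_pos rfl, hc]
    have hgo : printStarGoA s.toList pi (pi + 1) = pyStarParts s.toList 1 (pi + 1) := by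
      have h2 := goA_eq_parts s.toList 1 (pi + 1) (by omega) (by omega) (by omega) (by omega) (by omega)
      rwa [show pi + 1 - 1 = pi from by omega] at h2
    simp [hgo]
  · rw [if_neg hb]
    have hd : 1 ≤ ci - pi ∨ ci = (s.toList.length : Int) - 1 := by
      rcases hpre with ⟨h0, _, _⟩ | ⟨h0, _, h2⟩
      · right; exact h0
      · left
        have : ¬ (pi = ci) ∨ ci = (s.toList.length : Int) - 1 := by tauto
        rcases this with h | h
        · omega
        · omega
    have h2 := goA_eq_parts s.toList (ci - pi) ci hd (by omega)
      (by rcases hpre with ⟨_, _, h2⟩ | ⟨h0, _, h2⟩ <;> omega)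
      (by rcases hpre with ⟨h0, h1, _⟩ | ⟨_, h1, h2⟩ <;> omega)
      (by rcases hpre with ⟨h0, _, _⟩ | ⟨h0, _, _⟩ <;> omega)
    rw [show ci - (ci - pi) = pi from by omega] at h2
    rw [h2]
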